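-- pv_equiv track=rewrite | github.com/lucid-lynxz/PyUtils | util/BertUtil.py | merge_lists_with_longer_match
-- ===== SOURCE A (Python) =====
-- from typing import Optional, List, Dict, Tuple, Set
--
-- def merge_lists_with_longer_match(list_a: List[str], list_b: List[str]) -> List[str]:
--     """
--     合并两个字符串列表，保留更长的匹配元素
--
--     规则：
--     - 如果一个元素是另一个元素的子串，则保留更长的元素
--     - 如果元素完全相同，只保留一个
--     - 如果没有包含关系，两个都保留
--
--     Args:
--         list_a: 第一个字符串列表
--         list_b: 第二个字符串列表
--
--     Returns:
--         合并后的列表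
--
--     Example:
--          A = ['ABC', 'efg']
--          B = ['ABCD', 'efg', 'hij']
--          merge_lists_with_longer_match(A, B)
--          结果: ['ABCD', 'efg', 'hij']
--     """
--     # 合并两个列表
--     combined = list_a + list_b
--     result = []
--
--     # 标记要删除的元素索引
--     to_remove = set()
--
--     for i in range(len(combined)):
--         if i in to_remove:
--             continue
--
--         for j in range(i + 1, len(combined)):
--             if j in to_remove:
--                 continue
--
--             item_i = combined[i]
--             item_j = combined[j]
--
--             # 判断包含关系
--             if item_i in item_j:
--                 # item_i 是 item_j 的子串，保留更长的 item_j，删除 item_i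
--                 to_remove.add(i)
--                 break
--             elif item_j in item_i:
--                 # item_j 是 item_i 的子串，保留更长的 item_i，删除 item_j
--                 to_remove.add(j)
--
--     # 构建结果列表
--     for i in range(len(combined)):
--         if i not in to_remove:
--             result.append(combined[i])
--
--     return result
-- ===== SOURCE B (Python) =====
-- from typing import List
--
-- def merge_lists_with_longer_match(list_a: List[str], list_b: List[str]) -> List[str]:
--     """Merge two string lists, dropping proper substrings of another element and
--     equal duplicates (keeping the last occurrence), via an independent per-element
--     keep predicate instead of a mutable removal set with break/skip coupling."""
--     combined = list_a + list_b
--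
--     def keep(i: int, x: str) -> bool:
--         for j, y in enumerate(combined):
--             if x != y and x in y:
--                 return False
--             if x == y and j > i:
--                 return False
--         return True
--
--     return [x for i, x in enumerate(combined) if keep(i, x)]
-- ===== Notes on version B (the rewrite author's own statement) =====
-- stated objective: simpler
-- what changed: Replaces A's mutable to_remove index set with break/skip coupling between iterations by an independent per-element keep predicate (drop x if it is a proper substring of any element, or an equal element occurs later), applied in one comprehension.
import Mathlib
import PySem

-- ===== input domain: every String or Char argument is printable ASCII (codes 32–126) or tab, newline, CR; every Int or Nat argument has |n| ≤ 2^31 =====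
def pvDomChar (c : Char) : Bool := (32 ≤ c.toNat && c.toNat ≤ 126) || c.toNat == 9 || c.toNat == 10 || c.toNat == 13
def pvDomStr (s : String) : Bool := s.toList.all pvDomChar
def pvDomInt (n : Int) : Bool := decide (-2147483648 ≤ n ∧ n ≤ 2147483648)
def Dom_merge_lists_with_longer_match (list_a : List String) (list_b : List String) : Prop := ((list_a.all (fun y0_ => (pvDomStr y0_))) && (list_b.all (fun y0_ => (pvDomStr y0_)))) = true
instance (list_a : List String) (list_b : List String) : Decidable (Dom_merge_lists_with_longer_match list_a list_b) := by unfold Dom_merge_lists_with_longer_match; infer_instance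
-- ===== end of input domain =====

-- B replaces A's mutable to_remove set (with break/skip coupling between loop
-- iterations) by an independent per-element keep predicate; same O(n^2) cost.


-- ===== PORT A =====
-- inner loop 'for j in range(i+1, len(combined)): …' with break;
-- combined[i]/combined[j]: the indices come from range(len(combined)), always in range, so pyGetD _ _ "" is exact.
def pvInnerA (cs : List String) (i : Int) : List Int → PySem.Set Int → PySem.Set Int
  | [], S => S
  | j :: js, S =>
    if S.contains j then pvInnerA cs i js S
    else
      let item_i := PySem.List.pyGetD cs i ""
      let item_j := PySem.List.pyGetD cs j ""
      if PySem.Str.isIn item_i item_j then S.add i          -- to_remove.add(i); break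
      else if PySem.Str.isIn item_j item_i then pvInnerA cs i js (S.add j)   -- to_remove.add(j)
      else pvInnerA cs i js S

def merge_lists_with_longer_match (list_a : List String) (list_b : List String) : List String :=
  let combined := list_a ++ list_b
  let n : Int := combined.length
  let to_remove : PySem.Set Int :=
    (PySem.List.pyRange 0 n).foldl
      (fun S i => if S.contains i then S
                  else pvInnerA combined i (PySem.List.pyRange (i + 1) n) S)
      PySem.Set.empty
  (PySem.List.pyRange 0 n).foldl
    (fun res i => if to_remove.contains i then res
                  else res ++ [PySem.List.pyGetD combined i ""]) []

-- ===== PORT B =====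
-- the 'for j, y in enumerate(combined): … return False … return True' loop of keep(i, x)
def pvKeep (i : Int) (x : String) : List (Int × String) → Bool
  | [] => true
  | (j, y) :: rest =>
    if x ≠ y ∧ PySem.Str.isIn x y then false
    else if x = y ∧ i < j then false
    else pvKeep i x rest

def merge_lists_with_longer_match_alt (list_a : List String) (list_b : List String) : List String :=
  let combined := list_a ++ list_b
  ((PySem.List.enumerate combined).filter
      (fun p => pvKeep p.1 p.2 (PySem.List.enumerate combined))).map (fun p => p.2)

-- ===== PRECONDITION & SPEC =====
def Spec_merge_lists_with_longer_match (list_a : List String) (list_b : List String) (out : List String) : Prop := out = merge_lists_with_longer_match_alt list_a list_b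
instance (list_a : List String) (list_b : List String) (out : List String) : Decidable (Spec_merge_lists_with_longer_match list_a list_b out) := by unfold Spec_merge_lists_with_longer_match; infer_instance

-- ===== CLAIM (what is proved, stated in full; the proofs are below) =====
def Claim_equal_merge_lists_with_longer_match : Prop := ∀ (list_a : List String) (list_b : List String), Dom_merge_lists_with_longer_match list_a list_b → Spec_merge_lists_with_longer_match list_a list_b (merge_lists_with_longer_match list_a list_b)

-- ===== LEMMAS AND PROOFS =====

-- 'index i of cs is dropped': cs[i] is a proper substring of some element, or an equal element occurs later
def pvBad (cs : List String) (i : Nat) : Prop :=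
  (∃ y ∈ cs, cs.getD i "" ≠ y ∧ (cs.getD i "").toList <:+: y.toList) ∨ cs.getD i "" ∈ cs.drop (i + 1)

-- membership in a tail by index
lemma pv_mem_drop_iff (cs : List String) (m : Nat) (x : String) :
    x ∈ cs.drop m ↔ ∃ k : Nat, m ≤ k ∧ k < cs.length ∧ cs.getD k "" = x := by
  rw [List.mem_iff_getElem?]
  constructor
  · rintro ⟨j, hj⟩
    rw [List.getElem?_drop] at hj
    have hlt : m + j < cs.length := by
      by_contra h
      rw [List.getElem?_eq_none (by omega)] at hj
      simp at hj
    refine ⟨m + j, Nat.le_add_right _ _, hlt, ?_⟩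
    simp [List.getD_eq_getElem?_getD, hj]
  · rintro ⟨k, hmk, hk, hke⟩
    refine ⟨k - m, ?_⟩
    rw [List.getElem?_drop, show m + (k - m) = k by omega]
    rw [List.getElem?_eq_getElem hk]
    rw [List.getD_eq_getElem cs "" hk] at hke
    simp [hke]

-- ---------- B side: characterising the keep loop ----------
lemma pvKeep_iff (i : Int) (x : String) :
    ∀ (cs : List String) (s : Int),
      pvKeep i x (PySem.List.enumerate cs s) = true ↔
        ((∀ y ∈ cs, ¬(x ≠ y ∧ x.toList <:+: y.toList)) ∧
         ∀ k : Nat, k < cs.length → cs.getD k "" = x → ¬ (i < s + k)) := by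
  intro cs
  induction cs with
  | nil => intro s; simp [PySem.List.enumerate, pvKeep]
  | cons y cs ih =>
    intro s
    rw [PySem.List.enumerate_cons]
    show (if x ≠ y ∧ PySem.Str.isIn x y then false
          else if x = y ∧ i < s then false
          else pvKeep i x (PySem.List.enumerate cs (s + 1))) = true ↔ _
    split_ifs with h1 h2
    · simp only [false_iff]
      intro ⟨hall, _⟩
      exact hall y (List.mem_cons_self) ⟨h1.1, (PySem.Str.isIn_iff_infix x y).1 h1.2⟩
    · simp only [false_iff]
      intro ⟨_, hidx⟩
      exact hidx 0 (by simp) (by simp [h2.1.symm]) (by simpa using h2.2)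
    · rw [ih (s + 1)]
      constructor
      · intro ⟨hall, hidx⟩
        refine ⟨?_, ?_⟩
        · intro z hz
          rcases List.mem_cons.1 hz with rfl | hz'
          · intro ⟨hne, hinf⟩
            exact h1 ⟨hne, (PySem.Str.isIn_iff_infix x z).2 hinf⟩
          · exact hall z hz'
        · intro k hk hke
          cases k with
          | zero =>
            simp at hke
            intro hlt
            exact h2 ⟨hke.symm, by simpa using hlt⟩
          | succ k' =>
            have hk' : k' < cs.length := by simpa using hk
            have hke' : cs.getD k' "" = x := by
              rw [List.getD_eq_getElem cs "" hk']
              rw [List.getD_eq_getElem _ "" hk] at hke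
              simpa using hke
            have := hidx k' hk' hke'
            intro hbad
            apply this
            push_cast at hbad ⊢
            omega
      · intro ⟨hall, hidx⟩
        refine ⟨fun z hz => hall z (List.mem_cons_of_mem _ hz), ?_⟩
        intro k hk hke
        have hk1 : k + 1 < (y :: cs).length := by simpa using Nat.succ_lt_succ hk
        have hke1 : (y :: cs).getD (k + 1) "" = x := by
          rw [List.getD_eq_getElem _ "" hk1]
          rw [List.getD_eq_getElem cs "" hk] at hke
          simpa using hke
        have := hidx (k + 1) hk1 hke1
        intro hbad
        apply this
        push_cast at hbad ⊢
        omega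

lemma pvKeep_iff_not_bad (cs : List String) (i : Nat) (hi : i < cs.length) :
    pvKeep (i : Int) (cs.getD i "") (PySem.List.enumerate cs) = true ↔ ¬ pvBad cs i := by
  rw [show PySem.List.enumerate cs = PySem.List.enumerate cs 0 from rfl, pvKeep_iff]
  unfold pvBad
  rw [pv_mem_drop_iff]
  constructor
  · intro ⟨hall, hidx⟩
    push Not
    refine ⟨fun y hy => ?_, ?_⟩
    · intro hne hinf; exact (hall y hy) ⟨hne, hinf⟩
    · intro k hk1 hk hke
      exact (hidx k hk hke) (by push_cast; omega)
  · intro hnb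
    push Not at hnb
    refine ⟨fun y hy => ?_, ?_⟩
    · intro ⟨hne, hinf⟩; exact hnb.1 y hy hne hinf
    · intro k hk hke hlt
      have hik : i < k := by push_cast at hlt; omega
      exact hnb.2 k (by omega) hk hke

-- ---------- A side: the inner loop ----------
lemma pvInnerA_mono (cs : List String) (i : Int) :
    ∀ (js : List Int) (S : PySem.Set Int) (z : Int), z ∈ S → z ∈ pvInnerA cs i js S := by
  intro js
  induction js with
  | nil => intro S z hz; simpa [pvInnerA] using hz
  | cons j js ih =>
    intro S z hz
    unfold pvInnerA
    dsimp only
    split_ifs with h1 h2 h3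
    · exact ih S z hz
    · exact (PySem.Set.mem_add S i z).2 (Or.inl hz)
    · exact ih _ z ((PySem.Set.mem_add S j z).2 (Or.inl hz))
    · exact ih S z hz

lemma pvInnerA_subset (cs : List String) (i : Int) :
    ∀ (js : List Int) (S : PySem.Set Int) (z : Int), z ∈ pvInnerA cs i js S →
      z ∈ S ∨ (z = i ∧ ∃ j ∈ js, PySem.Str.isIn (PySem.List.pyGetD cs i "") (PySem.List.pyGetD cs j "") = true)
            ∨ (z ∈ js ∧ PySem.Str.isIn (PySem.List.pyGetD cs z "") (PySem.List.pyGetD cs i "") = true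
                     ∧ PySem.Str.isIn (PySem.List.pyGetD cs i "") (PySem.List.pyGetD cs z "") = false) := by
  intro js
  induction js with
  | nil => intro S z hz; left; simpa [pvInnerA] using hz
  | cons j js ih =>
    intro S z hz
    unfold pvInnerA at hz
    dsimp only at hz
    split_ifs at hz with h1 h2 h3
    · rcases ih S z hz with h | ⟨rfl, j', hj', hin⟩ | ⟨hzj, hin1, hin2⟩
      · exact Or.inl h
      · exact Or.inr (Or.inl ⟨rfl, j', List.mem_cons_of_mem _ hj', hin⟩)
      · exact Or.inr (Or.inr ⟨List.mem_cons_of_mem _ hzj, hin1, hin2⟩)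
    · rcases (PySem.Set.mem_add S i z).1 hz with h | rfl
      · exact Or.inl h
      · exact Or.inr (Or.inl ⟨rfl, j, List.mem_cons_self, h2⟩)
    · rcases ih _ z hz with h | ⟨rfl, j', hj', hin⟩ | ⟨hzj, hin1, hin2⟩
      · rcases (PySem.Set.mem_add S j z).1 h with h' | rfl
        · exact Or.inl h'
        · exact Or.inr (Or.inr ⟨List.mem_cons_self, h3, by simpa using h2⟩)
      · exact Or.inr (Or.inl ⟨rfl, j', List.mem_cons_of_mem _ hj', hin⟩)
      · exact Or.inr (Or.inr ⟨List.mem_cons_of_mem _ hzj, hin1, hin2⟩)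
    · rcases ih S z hz with h | ⟨rfl, j', hj', hin⟩ | ⟨hzj, hin1, hin2⟩
      · exact Or.inl h
      · exact Or.inr (Or.inl ⟨rfl, j', List.mem_cons_of_mem _ hj', hin⟩)
      · exact Or.inr (Or.inr ⟨List.mem_cons_of_mem _ hzj, hin1, hin2⟩)

lemma pvInnerA_break (cs : List String) (i : Int) :
    ∀ (js : List Int) (S : PySem.Set Int) (j : Int), j ∈ js → ¬ (j ∈ S) →
      PySem.Str.isIn (PySem.List.pyGetD cs i "") (PySem.List.pyGetD cs j "") = true →
      i ∈ pvInnerA cs i js S := by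
  intro js
  induction js with
  | nil => intro S j hj; simp at hj
  | cons j0 js ih =>
    intro S j hj hjS hin
    unfold pvInnerA
    dsimp only
    split_ifs with h1 h2 h3
    · rcases List.mem_cons.1 hj with rfl | hj'
      · exact absurd ((PySem.Set.contains_iff S j).1 h1) hjS
      · exact ih S j hj' hjS hin
    · exact (PySem.Set.mem_add S i i).2 (Or.inr rfl)
    · rcases List.mem_cons.1 hj with rfl | hj'
      · exact absurd hin (by simpa using h2)
      · refine ih _ j hj' ?_ hin
        intro hmem
        rcases (PySem.Set.mem_add S j0 j).1 hmem with h | rfl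
        · exact hjS h
        · exact (by simpa using h2 : ¬ _) hin
    · rcases List.mem_cons.1 hj with rfl | hj'
      · exact absurd hin (by simpa using h2)
      · exact ih S j hj' hjS hin

lemma pvInnerA_removes (cs : List String) (i : Int) :
    ∀ (js : List Int) (S : PySem.Set Int),
      (∀ j ∈ js, PySem.Str.isIn (PySem.List.pyGetD cs i "") (PySem.List.pyGetD cs j "") = false) →
      ∀ j ∈ js, PySem.Str.isIn (PySem.List.pyGetD cs j "") (PySem.List.pyGetD cs i "") = true →
      j ∈ pvInnerA cs i js S := by
  intro js
  induction js with
  | nil => intro S _ j hj; simp at hj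
  | cons j0 js ih =>
    intro S hno j hj hin
    unfold pvInnerA
    dsimp only
    split_ifs with h1 h2 h3
    · rcases List.mem_cons.1 hj with rfl | hj'
      · exact pvInnerA_mono cs i js S j ((PySem.Set.contains_iff S j).1 h1)
      · exact ih S (fun j' hj' => hno j' (List.mem_cons_of_mem _ hj')) j hj' hin
    · have hx := hno j0 List.mem_cons_self
      rw [h2] at hx
      simp at hx
    · rcases List.mem_cons.1 hj with rfl | hj'
      · exact pvInnerA_mono cs i js _ j ((PySem.Set.mem_add S j j).2 (Or.inr rfl))
      · exact ih _ (fun j' hj' => hno j' (List.mem_cons_of_mem _ hj')) j hj' hin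
    · rcases List.mem_cons.1 hj with rfl | hj'
      · exact absurd hin h3
      · exact ih S (fun j' hj' => hno j' (List.mem_cons_of_mem _ hj')) j hj' hin

-- ---------- A side: the outer loop invariant ----------
def pvStepA (cs : List String) (n : Int) (S : PySem.Set Int) (i : Int) : PySem.Set Int :=
  if S.contains i then S else pvInnerA cs i (PySem.List.pyRange (i + 1) n) S

def pvInv (cs : List String) (k : Nat) (S : PySem.Set Int) : Prop :=
  (∀ z ∈ (S : List Int), ∃ j : Nat, j < cs.length ∧ z = (j : Int) ∧ pvBad cs j) ∧
  (∀ i : Nat, i < k → pvBad cs i → ((i : Int) ∈ S)) ∧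
  (∀ i : Nat, i < k → ¬ pvBad cs i →
     ∀ j : Nat, i < j → j < cs.length → cs.getD j "" ≠ cs.getD i "" →
       (cs.getD j "").toList <:+: (cs.getD i "").toList → ((j : Int) ∈ S))

lemma pv_len_le_sum (cs : List String) (j : Nat) (hj : j < cs.length) :
    (cs.getD j "").toList.length ≤ (cs.map (fun s => s.toList.length)).sum := by
  have hmem : (cs.getD j "").toList.length ∈ cs.map (fun s => s.toList.length) := by
    rw [List.getD_eq_getElem cs "" hj]
    exact List.mem_map.2 ⟨cs[j], List.getElem_mem hj, rfl⟩
  exact List.single_le_sum (fun x _ => Nat.zero_le x) _ hmem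

-- for every index k there is an index m whose string contains cs[k] and which A never drops
lemma pv_exists_unremovable (cs : List String) :
    ∀ (N : Nat) (j : Nat), j < cs.length →
      ((cs.map (fun s => s.toList.length)).sum - (cs.getD j "").toList.length) * (cs.length + 1)
        + (cs.length - j) ≤ N →
      ∃ m : Nat, m < cs.length ∧ (cs.getD j "").toList <:+: (cs.getD m "").toList ∧ ¬ pvBad cs m := by
  intro N
  induction N with
  | zero =>
    intro j hj hμ
    exact absurd hμ (by
      set P := ((cs.map (fun s => s.toList.length)).sum - (cs.getD j "").toList.length) * (cs.length + 1) with hP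
      omega)
  | succ N ih =>
    intro j hj hμ
    by_cases hb : pvBad cs j
    · rcases hb with ⟨y, hy, hne, hinf⟩ | hdup
      · rcases List.mem_iff_getElem.1 hy with ⟨j', hj', rfl⟩
        have hgd : cs.getD j' "" = cs[j'] := List.getD_eq_getElem cs "" hj'
        have hlen : (cs.getD j "").toList.length < cs[j'].toList.length := by
          have hsub := List.IsInfix.length_le hinf
          rcases Nat.lt_or_ge (cs.getD j "").toList.length cs[j'].toList.length with h | h
          · exact h
          · exfalso
            apply hne
            have : (cs.getD j "").toList = cs[j'].toList := hinf.eq_of_length_le h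
            exact String.toList_inj.1 this
        have hlef : cs[j'].toList.length ≤ (cs.map (fun s => s.toList.length)).sum := by
          have := pv_len_le_sum cs j' hj'; rwa [hgd] at this
        have hstep : ((cs.map (fun s => s.toList.length)).sum - (cs.getD j' "").toList.length) * (cs.length + 1)
            + (cs.length - j') ≤ N := by
          rw [hgd]
          have h2 : ((cs.map (fun s => s.toList.length)).sum - cs[j'].toList.length) * (cs.length + 1) + (cs.length + 1)
              ≤ ((cs.map (fun s => s.toList.length)).sum - (cs.getD j "").toList.length) * (cs.length + 1) := by
            rw [← Nat.succ_mul]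
            exact Nat.mul_le_mul_right _ (by omega)
          omega
        rcases ih j' hj' hstep with ⟨m, hm, hinf', hnb⟩
        exact ⟨m, hm, hinf.trans (hgd ▸ hinf'), hnb⟩
      · rcases (pv_mem_drop_iff cs (j + 1) _).1 hdup with ⟨j', hj'1, hj', hje⟩
        rcases ih j' hj' (by rw [hje]; omega) with ⟨m, hm, hinf', hnb⟩
        refine ⟨m, hm, ?_, hnb⟩
        rw [← hje]
        exact hinf'
    · exact ⟨j, hj, List.infix_refl _, hb⟩

lemma pv_pyGetD_getD (cs : List String) (k : Nat) :
    PySem.List.pyGetD cs (k : Int) "" = cs.getD k "" := by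
  simpa using PySem.List.pyGetD_natCast cs k ""

lemma pvInv_step (cs : List String) (k : Nat) (hk : k < cs.length) (S : PySem.Set Int)
    (h : pvInv cs k S) : pvInv cs (k + 1) (pvStepA cs (cs.length : Int) S (k : Int)) := by
  obtain ⟨h1, h2, h3⟩ := h
  unfold pvStepA
  by_cases hc : S.contains (k : Int) = true
  · rw [if_pos hc]
    refine ⟨h1, ?_, ?_⟩
    · intro i hi hbi
      rcases Nat.lt_or_ge i k with h' | h'
      · exact h2 i h' hbi
      · have : i = k := by omega
        subst this
        exact (PySem.Set.contains_iff S _).1 hc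
    · intro i hi hnbi j hij hjl hne hinf
      rcases Nat.lt_or_ge i k with h' | h'
      · exact h3 i h' hnbi j hij hjl hne hinf
      · have : i = k := by omega
        subst this
        exfalso
        rcases h1 _ ((PySem.Set.contains_iff S _).1 hc) with ⟨j', _, hj'e, hbj'⟩
        have : i = j' := by exact_mod_cast hj'e
        exact hnbi (this ▸ hbj')
  · rw [if_neg hc]
    have hjsmem : ∀ j : Int, j ∈ PySem.List.pyRange ((k : Int) + 1) (cs.length : Int) ↔
        ((k : Int) + 1 ≤ j ∧ j < (cs.length : Int)) := fun j => PySem.List.mem_pyRange_one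
    set js := PySem.List.pyRange ((k : Int) + 1) (cs.length : Int) with hjs
    refine ⟨?_, ?_, ?_⟩
    · -- I1: everything in the new set is a Bad index
      intro z hz
      rcases pvInnerA_subset cs (k : Int) js S z hz with hzS | ⟨rfl, j, hjmem, hin⟩ | ⟨hzjs, hin1, hin2⟩
      · exact h1 z hzS
      · -- k was break-removed: some later j contains cs[k]
        refine ⟨k, hk, rfl, ?_⟩
        obtain ⟨hj1, hj2⟩ := (hjsmem j).1 hjmem
        have hj0 : 0 ≤ j := by omega
        have hjn : j.toNat < cs.length := by omega
        have hgj : PySem.List.pyGetD cs j "" = cs.getD j.toNat "" := by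
          have hx := pv_pyGetD_getD cs j.toNat
          rwa [show ((j.toNat : Nat) : Int) = j by omega] at hx
        rw [pv_pyGetD_getD, hgj] at hin
        have hinf := (PySem.Str.isIn_iff_infix _ _).1 hin
        by_cases heq : cs.getD k "" = cs.getD j.toNat ""
        · right
          rw [pv_mem_drop_iff]
          exact ⟨j.toNat, by omega, hjn, heq.symm⟩
        · left
          refine ⟨cs.getD j.toNat "", ?_, heq, hinf⟩
          rw [List.getD_eq_getElem cs "" hjn]
          exact List.getElem_mem hjn
      · -- some j > k was removed as a proper substring of cs[k]
        obtain ⟨hj1, hj2⟩ := (hjsmem z).1 hzjs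
        have hzn : z.toNat < cs.length := by omega
        refine ⟨z.toNat, hzn, by omega, ?_⟩
        have hgz : PySem.List.pyGetD cs z "" = cs.getD z.toNat "" := by
          have hx := pv_pyGetD_getD cs z.toNat
          rwa [show ((z.toNat : Nat) : Int) = z by omega] at hx
        rw [hgz, pv_pyGetD_getD] at hin1 hin2
        left
        refine ⟨cs.getD k "", ?_, ?_, (PySem.Str.isIn_iff_infix _ _).1 hin1⟩
        · rw [List.getD_eq_getElem cs "" hk]; exact List.getElem_mem hk
        · intro heq
          rw [heq] at hin2
          have hrefl := (PySem.Str.isIn_iff_infix (cs.getD k "") (cs.getD k "")).2 (List.infix_refl _)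
          rw [hin2] at hrefl
          simp at hrefl
    · -- I2: all Bad indices ≤ k are removed
      intro i hi hbi
      rcases Nat.lt_or_ge i k with h' | h'
      · exact pvInnerA_mono cs _ js S _ (h2 i h' hbi)
      · have : i = k := by omega
        subst this
        -- find an unremovable superstring m of cs[i]
        obtain ⟨m, hm, hinf, hnbm⟩ := pv_exists_unremovable cs
          (((cs.map (fun s => s.toList.length)).sum - (cs.getD i "").toList.length) * (cs.length + 1)
            + (cs.length - i)) i hk (le_refl _)
        have hmS : ¬ ((m : Int) ∈ S) := by
          intro hmem
          rcases h1 _ hmem with ⟨j', _, hj'e, hbj'⟩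
          have : m = j' := by exact_mod_cast hj'e
          exact hnbm (this ▸ hbj')
        have him : i < m := by
          rcases Nat.lt_trichotomy i m with h'' | h'' | h''
          · exact h''
          · exfalso; exact hnbm (h'' ▸ hbi)
          · exfalso
            -- m < i: either equal value (making m Bad) or proper, then I3 removed i already
            by_cases heq : cs.getD i "" = cs.getD m ""
            · apply hnbm
              right
              rw [pv_mem_drop_iff]
              exact ⟨i, by omega, hk, heq⟩
            · have := h3 m h'' hnbm i h'' hk heq hinf
              exact hc ((PySem.Set.contains_iff S _).2 this)
        refine pvInnerA_break cs (i : Int) js S (m : Int) ?_ hmS ?_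
        · rw [hjsmem]
          have hm' : (m : Int) < (cs.length : Int) := by exact_mod_cast hm
          omega
        · rw [pv_pyGetD_getD, pv_pyGetD_getD]
          exact (PySem.Str.isIn_iff_infix _ _).2 hinf
    · -- I3: a non-Bad index ≤ k removes all its later proper substrings
      intro i hi hnbi j hij hjl hne hinf
      rcases Nat.lt_or_ge i k with h' | h'
      · exact pvInnerA_mono cs _ js S _ (h3 i h' hnbi j hij hjl hne hinf)
      · have : i = k := by omega
        subst this
        have hno : ∀ j' ∈ js, PySem.Str.isIn (PySem.List.pyGetD cs (i : Int) "") (PySem.List.pyGetD cs j' "") = false := by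
          intro j' hj'
          obtain ⟨ha, hb⟩ := (hjsmem j').1 hj'
          have hj'n : j'.toNat < cs.length := by omega
          have hgj : PySem.List.pyGetD cs j' "" = cs.getD j'.toNat "" := by
            have hx := pv_pyGetD_getD cs j'.toNat
            rwa [show ((j'.toNat : Nat) : Int) = j' by omega] at hx
          rw [pv_pyGetD_getD, hgj]
          by_contra hcon
          have htrue : PySem.Str.isIn (cs.getD i "") (cs.getD j'.toNat "") = true := by
            cases h'' : PySem.Str.isIn (cs.getD i "") (cs.getD j'.toNat "") with
            | false => exact absurd h'' hcon
            | true => rfl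
          have hinf' := (PySem.Str.isIn_iff_infix _ _).1 htrue
          apply hnbi
          by_cases heq : cs.getD i "" = cs.getD j'.toNat ""
          · right
            rw [pv_mem_drop_iff]
            exact ⟨j'.toNat, by omega, hj'n, heq.symm⟩
          · left
            refine ⟨cs.getD j'.toNat "", ?_, heq, hinf'⟩
            rw [List.getD_eq_getElem cs "" hj'n]
            exact List.getElem_mem hj'n
        refine pvInnerA_removes cs (i : Int) js S hno (j : Int) ?_ ?_
        · rw [hjsmem]
          have hjl' : (j : Int) < (cs.length : Int) := by exact_mod_cast hjl
          omega
        · rw [pv_pyGetD_getD, pv_pyGetD_getD]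
          exact (PySem.Str.isIn_iff_infix _ _).2 hinf

lemma pvInv_fold (cs : List String) :
    ∀ k : Nat, k ≤ cs.length →
      pvInv cs k (((List.range k).map (fun j : Nat => (j : Int))).foldl
        (pvStepA cs (cs.length : Int)) PySem.Set.empty) := by
  intro k
  induction k with
  | zero =>
    intro _
    refine ⟨?_, ?_, ?_⟩
    · intro z hz
      simp [PySem.Set.empty] at hz
    · intro i hi
      omega
    · intro i hi
      omega
  | succ k ih =>
    intro hk
    rw [List.range_succ, List.map_append, List.foldl_append]
    exact pvInv_step cs k (by omega) _ (ih (by omega))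

-- the final removal set decides exactly pvBad on in-range indices
lemma pv_final_set (cs : List String) (k : Nat) (hk : k < cs.length) :
    ((((List.range cs.length).map (fun j : Nat => (j : Int))).foldl
        (pvStepA cs (cs.length : Int)) PySem.Set.empty).contains (k : Int) = true) ↔ pvBad cs k := by
  obtain ⟨h1, h2, _⟩ := pvInv_fold cs cs.length (le_refl _)
  constructor
  · intro hc
    rcases h1 _ ((PySem.Set.contains_iff _ _).1 hc) with ⟨j, _, hje, hbj⟩
    have : k = j := by exact_mod_cast hje
    exact this ▸ hbj
  · intro hb
    exact (PySem.Set.contains_iff _ _).2 (h2 k hk hb)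

-- ---------- reshaping the two output-building passes ----------
lemma pv_resultA_eq (cs : List String) (S : PySem.Set Int) :
    (PySem.List.pyRange 0 (cs.length : Int)).foldl
        (fun res i => if S.contains i then res else res ++ [PySem.List.pyGetD cs i ""]) []
      = ((List.range cs.length).filter (fun k : Nat => !S.contains (k : Int))).map (fun k : Nat => cs.getD k "") := by
  rw [PySem.List.pyRange_zero_natCast, List.foldl_map]
  have hfe : (fun (res : List String) (k : Nat) =>
      if S.contains ((fun j : Nat => (j : Int)) k) then res else res ++ [PySem.List.pyGetD cs ((fun j : Nat => (j : Int)) k) ""]) =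
      (fun (res : List String) (k : Nat) => if (!S.contains (k : Int)) = true then res ++ [cs.getD k ""] else res) := by
    funext res k
    simp only []
    rw [pv_pyGetD_getD]
    cases h : S.contains (k : Int) <;> simp [h]
  rw [hfe, PySem.List.foldl_append_if (fun k : Nat => !S.contains (k : Int)) (fun k : Nat => cs.getD k "")]
  simp

lemma pv_resultB_eq (cs : List String) (q : Int → String → Bool) :
    ((PySem.List.enumerate cs).filter (fun p => q p.1 p.2)).map (fun p => p.2)
      = ((List.range cs.length).filter (fun k : Nat => q (k : Int) (cs.getD k ""))).map (fun k : Nat => cs.getD k "") := by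
  rw [PySem.List.enumerate_eq_map_pyRange cs "", show PySem.List.len cs = (cs.length : Int) from rfl,
    PySem.List.pyRange_zero_natCast, List.map_map, List.filter_map, List.map_map]
  have hp : ((fun p : Int × String => q p.1 p.2) ∘ ((fun j : Int => (j, PySem.List.pyGetD cs j "")) ∘ fun k : Nat => (k : Int)))
      = (fun k : Nat => q (k : Int) (cs.getD k "")) := by
    funext k
    simp [Function.comp]
  have hg : ((fun p : Int × String => p.2) ∘ ((fun j : Int => (j, PySem.List.pyGetD cs j "")) ∘ fun k : Nat => (k : Int)))
      = (fun k : Nat => cs.getD k "") := by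
    funext k
    simp [Function.comp]
  rw [hp, hg]

-- ===== VERDICT (by name: the statement is the Claim_ definition above) =====
theorem merge_lists_with_longer_match_spec : Claim_equal_merge_lists_with_longer_match := by
  intro la lb _
  unfold Spec_merge_lists_with_longer_match merge_lists_with_longer_match merge_lists_with_longer_match_alt
  set cs := la ++ lb with hc
  rw [pv_resultB_eq cs (fun i x => pvKeep i x (PySem.List.enumerate cs))]
  rw [pv_resultA_eq]
  rw [show PySem.List.pyRange 0 ((cs.length : Nat) : Int) =
        (List.range cs.length).map (fun j : Nat => (j : Int)) from PySem.List.pyRange_zero_natCast _]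
  have hS : ((List.range cs.length).map (fun j : Nat => (j : Int))).foldl
      (fun S i => if S.contains i then S else pvInnerA cs i (PySem.List.pyRange (i + 1) (cs.length : Int)) S)
      PySem.Set.empty
      = ((List.range cs.length).map (fun j : Nat => (j : Int))).foldl
          (pvStepA cs (cs.length : Int)) PySem.Set.empty := rfl
  rw [hS]
  congr 1
  apply List.filter_congr
  intro k hk
  have hkl : k < cs.length := List.mem_range.1 hk
  have hA := pv_final_set cs k hkl
  have hB := pvKeep_iff_not_bad cs k hkl
  by_cases hb : pvBad cs k
  · have h1 : pvKeep (k : Int) (cs.getD k "") (PySem.List.enumerate cs) = false := by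
      cases h : pvKeep (k : Int) (cs.getD k "") (PySem.List.enumerate cs) with
      | false => rfl
      | true => exact absurd (hB.1 h) (by simpa using hb)
    rw [h1, hA.2 hb]
    rfl
  · have hfalse : ((((List.range cs.length).map (fun j : Nat => (j : Int))).foldl
        (pvStepA cs (cs.length : Int)) PySem.Set.empty).contains (k : Int)) = false := by
      cases h : ((((List.range cs.length).map (fun j : Nat => (j : Int))).foldl
        (pvStepA cs (cs.length : Int)) PySem.Set.empty).contains (k : Int)) with
      | false => rfl
      | true => exact absurd (hA.1 h) hb
    rw [hfalse, hB.2 hb]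
    rfl
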